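-- pv_equiv track=rewrite | github.com/shouzhiyuxian/skills | scripts/jumpserver_api/jms_runtime.py | _pagination_arg_names
-- ===== SOURCE A (Python) =====
-- def _pagination_arg_names(tokens: list[str]) -> list[str]:
--     names: list[str] = []
--     for token in tokens:
--         if token in {"--limit", "--offset"}:
--             names.append(token)
--             continue
--         if token.startswith("--limit="):
--             names.append("--limit")
--             continue
--         if token.startswith("--offset="):
--             names.append("--offset")
--     seen: list[str] = []
--     for item in names:
--         if item not in seen:
--             seen.append(item)
--     return seen
-- ===== SOURCE B (Python) =====
-- def _pagination_arg_names(tokens: list[str]) -> list[str]: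
--     first: dict[str, int] = {}
--     for i, token in enumerate(tokens):
--         if token == "--limit" or token.startswith("--limit="):
--             first.setdefault("--limit", i)
--         elif token == "--offset" or token.startswith("--offset="):
--             first.setdefault("--offset", i)
--     return sorted(first, key=first.get)
-- ===== Notes on version B (the rewrite author's own statement) =====
-- stated objective: alternative
-- what changed: Replaces A's two passes (append classified flag names, then membership-dedup against a growing seen list) with a single enumerated pass that records each flag's first index via dict.setdefault and returns the keys sorted by that first index.
import Mathlib
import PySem

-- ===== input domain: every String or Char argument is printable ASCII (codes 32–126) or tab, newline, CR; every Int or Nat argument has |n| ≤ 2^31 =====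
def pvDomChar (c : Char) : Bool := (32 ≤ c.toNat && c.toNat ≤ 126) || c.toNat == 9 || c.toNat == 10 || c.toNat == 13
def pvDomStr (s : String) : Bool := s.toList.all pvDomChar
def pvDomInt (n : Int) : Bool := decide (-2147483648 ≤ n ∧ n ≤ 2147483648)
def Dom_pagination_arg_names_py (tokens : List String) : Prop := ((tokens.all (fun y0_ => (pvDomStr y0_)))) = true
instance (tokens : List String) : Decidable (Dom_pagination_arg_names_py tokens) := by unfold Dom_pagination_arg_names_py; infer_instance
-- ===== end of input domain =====

-- B replaces A's two passes (append classified names, then membership-dedup against a growing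
-- `seen` list) by one enumerated pass recording each flag's first index in a dict and returning
-- the keys sorted by that first index (objective: alternative single-pass decomposition).

-- ===== PORT A =====
-- loop body of A's first pass (classification/append)
def pvStepNames (acc : List String) (token : String) : List String :=
  if token = "--limit" ∨ token = "--offset" then acc ++ [token]
  else if PySem.Str.startswith token "--limit=" then acc ++ ["--limit"]
  else if PySem.Str.startswith token "--offset=" then acc ++ ["--offset"]
  else acc

-- loop body of A's second pass (order-preserving dedup)
def pvStepSeen (seen : List String) (item : String) : List String :=
  if item ∈ seen then seen else seen ++ [item]

def pagination_arg_names_py (tokens : List String) : List String :=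
  let names := tokens.foldl pvStepNames []
  names.foldl pvStepSeen []

-- ===== PORT B =====
-- loop body of B's single pass: first.setdefault(name, i)
def pvStepFirst (d : PySem.Dict String Int) (p : Int × String) : PySem.Dict String Int :=
  if p.2 = "--limit" ∨ PySem.Str.startswith p.2 "--limit=" then d.setdefault "--limit" p.1
  else if p.2 = "--offset" ∨ PySem.Str.startswith p.2 "--offset=" then d.setdefault "--offset" p.1
  else d

def pagination_arg_names_py_alt (tokens : List String) : List String :=
  let first := (PySem.List.enumerate tokens).foldl pvStepFirst PySem.Dict.empty
  -- sorted(first, key=first.get): every iterated key is present in `first`, so first.get k = first.getD k 0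
  PySem.List.sorted first.keys (fun k => first.getD k 0) false

-- ===== PRECONDITION & SPEC =====
def Spec_pagination_arg_names_py (tokens : List String) (out : List String) : Prop := out = pagination_arg_names_py_alt tokens
instance (tokens : List String) (out : List String) : Decidable (Spec_pagination_arg_names_py tokens out) := by unfold Spec_pagination_arg_names_py; infer_instance

-- ===== CLAIM (what is proved, stated in full; the proofs are below) =====
def Claim_equal_pagination_arg_names_py : Prop := ∀ (tokens : List String), Dom_pagination_arg_names_py tokens → Spec_pagination_arg_names_py tokens (pagination_arg_names_py tokens)

-- ===== LEMMAS AND PROOFS =====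

-- canonical per-token classification (branch conditions are B's; proved equal to A's step)
def pvCls (t : String) : Option String :=
  if t = "--limit" ∨ PySem.Str.startswith t "--limit=" then some "--limit"
  else if t = "--offset" ∨ PySem.Str.startswith t "--offset=" then some "--offset"
  else none

def pvClsList (t : String) : List String := (pvCls t).toList

-- first-occurrence dedup (what Python's membership-dedup loop computes)
def pvFdedup : List String → List String
  | [] => []
  | x :: l => x :: (pvFdedup l).filter (fun y => decide (y ≠ x))

-- the (name, first-index) pairs B's dict loop appends, given already-present keys ks
def pvNews (ks : List String) : List (Int × String) → List (String × Int)
  | [] => []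
  | p :: ps =>
    match pvCls p.2 with
    | none => pvNews ks ps
    | some n => if n ∈ ks then pvNews ks ps else (n, p.1) :: pvNews (ks ++ [n]) ps

lemma pvStepNames_eq (acc : List String) (t : String) :
    pvStepNames acc t = acc ++ pvClsList t := by
  unfold pvStepNames pvClsList pvCls
  by_cases e1 : t = "--limit"
  · simp [e1]
  · by_cases e2 : t = "--offset"
    · subst e2; simp [e1]; decide
    · by_cases s1 : PySem.Chars.startswith t.toList ['-','-','l','i','m','i','t','='] = true <;>
        by_cases s2 : PySem.Chars.startswith t.toList ['-','-','o','f','f','s','e','t','='] = true <;>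
        simp [e1, e2, s1, s2]

lemma pvStepFirst_eq (d : PySem.Dict String Int) (p : Int × String) :
    pvStepFirst d p = (pvCls p.2).elim d (fun n => d.setdefault n p.1) := by
  unfold pvStepFirst pvCls
  split_ifs <;> rfl

lemma pvFoldNames (ts : List String) : ∀ acc : List String,
    ts.foldl pvStepNames acc = acc ++ ts.flatMap pvClsList := by
  induction ts with
  | nil => simp
  | cons t ts ih =>
    intro acc
    simp [List.foldl_cons, pvStepNames_eq, ih]

lemma pvFdedup_nodup (l : List String) : (pvFdedup l).Nodup := by
  induction l with
  | nil => exact List.nodup_nil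
  | cons x l ih =>
    refine List.Nodup.cons ?_ (ih.filter _)
    intro hmem
    have := List.of_mem_filter hmem
    simp at this

lemma pvFilter_fdedup (p : String → Bool) (l : List String) :
    pvFdedup (l.filter p) = (pvFdedup l).filter p := by
  induction l with
  | nil => rfl
  | cons x l ih =>
    cases hx : p x with
    | true =>
      rw [List.filter_cons_of_pos hx]
      show x :: (pvFdedup (l.filter p)).filter _ = (x :: (pvFdedup l).filter _).filter p
      rw [List.filter_cons_of_pos hx, ih, List.filter_filter, List.filter_filter]
      congr 1
      apply List.filter_congr
      intro y _
      simp [Bool.and_comm]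
    | false =>
      rw [List.filter_cons_of_neg (by simp [hx])]
      rw [ih]
      show (pvFdedup l).filter p = (x :: (pvFdedup l).filter (fun y => decide (y ≠ x))).filter p
      rw [List.filter_cons_of_neg (by simp [hx]), List.filter_filter]
      symm
      apply List.filter_congr
      intro y _
      by_cases hyx : y = x
      · subst hyx; simp [hx]
      · simp [hyx]

-- appending a fresh name to the seen-set splits off one more filter
lemma pvFilter_snoc (l seen : List String) (x : String) :
    l.filter (fun y => decide (y ∉ seen ++ [x]))
      = (l.filter (fun y => decide (y ∉ seen))).filter (fun y => decide (y ≠ x)) := by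
  rw [List.filter_filter]
  apply List.filter_congr
  intro y _
  simp [List.mem_append, not_or, Bool.and_comm]

lemma pvFoldSeen (l : List String) : ∀ seen : List String,
    l.foldl pvStepSeen seen = seen ++ pvFdedup (l.filter (fun x => decide (x ∉ seen))) := by
  induction l with
  | nil => intro seen; simp [pvFdedup]
  | cons x l ih =>
    intro seen
    rw [List.foldl_cons]
    by_cases hx : x ∈ seen
    · rw [show pvStepSeen seen x = seen from if_pos hx, ih]
      rw [List.filter_cons_of_neg (by simp [hx])]
    · rw [show pvStepSeen seen x = seen ++ [x] from if_neg hx, ih]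
      rw [List.filter_cons_of_pos (by simp [hx])]
      show (seen ++ [x]) ++ pvFdedup _ = seen ++ (x :: (pvFdedup _).filter _)
      rw [pvFilter_snoc, pvFilter_fdedup, List.append_assoc]
      rfl

lemma pvA_eq (tokens : List String) :
    pagination_arg_names_py tokens = pvFdedup (tokens.flatMap pvClsList) := by
  unfold pagination_arg_names_py
  rw [pvFoldNames, pvFoldSeen]
  simp

lemma pvFoldFirst_items (ps : List (Int × String)) : ∀ (d : PySem.Dict String Int),
    d.keys.Nodup → (ps.foldl pvStepFirst d).items = d.items ++ pvNews d.keys ps := by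
  induction ps with
  | nil => intro d _; simp [pvNews]
  | cons p ps ih =>
    intro d hnd
    rw [List.foldl_cons, pvStepFirst_eq]
    cases h : pvCls p.2 with
    | none => simp [pvNews, h, ih d hnd]
    | some n =>
      by_cases hin : n ∈ d.keys
      · have hc : d.contains n = true := (PySem.Dict.contains_iff_mem_keys d n).mpr hin
        simp only [Option.elim, PySem.Dict.setdefault_of_contains d p.1 hc]
        rw [ih d hnd]
        simp [pvNews, h, hin]
      · have hc : d.contains n = false := by
          rw [PySem.Dict.contains_eq_decide_mem_keys]; simp [hin]
        simp only [Option.elim, PySem.Dict.setdefault_of_not_contains d p.1 hc]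
        have hnd' : (d.insert n p.1).keys.Nodup := PySem.Dict.nodup_keys_insert d n p.1 hnd
        rw [ih _ hnd', PySem.Dict.keys_insert_of_not_contains d p.1 hc,
            PySem.Dict.items_insert_of_not_contains d p.1 hc]
        simp [pvNews, h, hin]

lemma pvNews_fst (ps : List (Int × String)) : ∀ ks : List String,
    (pvNews ks ps).map Prod.fst
      = pvFdedup (((ps.map (fun q => q.2)).flatMap pvClsList).filter (fun x => decide (x ∉ ks))) := by
  induction ps with
  | nil => intro ks; simp [pvNews, pvFdedup]
  | cons p ps ih =>
    intro ks
    cases h : pvCls p.2 with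
    | none =>
      simp only [pvNews, h, List.map_cons, List.flatMap_cons]
      rw [show pvClsList p.2 = [] by simp [pvClsList, h]]
      simpa using ih ks
    | some n =>
      simp only [pvNews, h, List.map_cons, List.flatMap_cons]
      rw [show pvClsList p.2 = [n] by simp [pvClsList, h]]
      by_cases hin : n ∈ ks
      · rw [if_pos hin]
        rw [show ([n] ++ (ps.map (fun q => q.2)).flatMap pvClsList).filter (fun x => decide (x ∉ ks))
              = ((ps.map (fun q => q.2)).flatMap pvClsList).filter (fun x => decide (x ∉ ks)) by
            simp [hin]]
        exact ih ks
      · rw [if_neg hin]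
        rw [show ([n] ++ (ps.map (fun q => q.2)).flatMap pvClsList).filter (fun x => decide (x ∉ ks))
              = n :: ((ps.map (fun q => q.2)).flatMap pvClsList).filter (fun x => decide (x ∉ ks)) by
            simp [hin]]
        show n :: (pvNews (ks ++ [n]) ps).map Prod.fst
          = n :: (pvFdedup (((ps.map (fun q => q.2)).flatMap pvClsList).filter (fun x => decide (x ∉ ks)))).filter
              (fun y => decide (y ≠ n))
        rw [ih (ks ++ [n]), pvFilter_snoc, pvFilter_fdedup]

lemma pvNews_snd_sublist (ps : List (Int × String)) : ∀ ks : List String,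
    ((pvNews ks ps).map Prod.snd).Sublist (ps.map (fun q => q.1)) := by
  induction ps with
  | nil => intro ks; simp [pvNews]
  | cons p ps ih =>
    intro ks
    cases h : pvCls p.2 with
    | none => simp only [pvNews, h, List.map_cons]; exact (ih ks).cons _
    | some n =>
      by_cases hin : n ∈ ks
      · simp only [pvNews, h, if_pos hin, List.map_cons]; exact (ih ks).cons _
      · simp only [pvNews, h, if_neg hin, List.map_cons]
        exact (ih (ks ++ [n])).cons₂ _

lemma pvB_eq (tokens : List String) :
    pagination_arg_names_py_alt tokens = pvFdedup (tokens.flatMap pvClsList) := by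
  set F := (PySem.List.enumerate tokens).foldl pvStepFirst PySem.Dict.empty with hF
  have hgoal : pagination_arg_names_py_alt tokens
      = PySem.List.sorted F.keys (fun k => F.getD k 0) false := rfl
  have hitems : F.items = pvNews [] (PySem.List.enumerate tokens) := by
    rw [hF, pvFoldFirst_items _ _ PySem.Dict.nodup_keys_empty, PySem.Dict.keys_empty]
    rw [show (PySem.Dict.empty : PySem.Dict String Int).items = [] from rfl]
    simp
  have hkeysdef : F.keys = F.items.map Prod.fst := rfl
  have hkeys : F.keys = pvFdedup (tokens.flatMap pvClsList) := by
    rw [hkeysdef, hitems, pvNews_fst]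
    rw [show (PySem.List.enumerate tokens).map (fun q => q.2) = tokens from
        PySem.List.map_snd_enumerate tokens 0]
    simp
  have hnd : F.keys.Nodup := by rw [hkeys]; exact pvFdedup_nodup _
  have hpair : F.items.Pairwise (fun p q => p.2 < q.2) := by
    have h1 : ((PySem.List.enumerate tokens).map (fun q => q.1)).Pairwise (· < ·) :=
      List.pairwise_map.mpr (PySem.List.pairwise_lt_enumerate tokens 0)
    have h2 : ((pvNews [] (PySem.List.enumerate tokens)).map Prod.snd).Pairwise (· < ·) :=
      List.Pairwise.sublist (pvNews_snd_sublist (PySem.List.enumerate tokens) []) h1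
    rw [hitems]
    exact List.pairwise_map.mp h2
  have hperm_pair : F.items.Pairwise (fun p q => (F.getD p.1 0 : Int) ≤ F.getD q.1 0) := by
    refine List.Pairwise.imp_of_mem ?_ hpair
    intro p q hp hq hlt
    have e1 := PySem.Dict.getD_of_mem_items F (k := p.1) (v := p.2) (by simpa using hp) hnd 0
    have e2 := PySem.Dict.getD_of_mem_items F (k := q.1) (v := q.2) (by simpa using hq) hnd 0
    rw [e1, e2]
    exact le_of_lt hlt
  have hkp : F.keys.Pairwise (fun a b => F.getD a 0 ≤ F.getD b 0) := by
    rw [hkeysdef]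
    exact List.pairwise_map.mpr hperm_pair
  rw [hgoal, PySem.List.sorted_eq_self_of_pairwise _ _ hkp]
  exact hkeys

theorem pagination_arg_names_py_spec : Claim_equal_pagination_arg_names_py := by
  intro tokens _
  unfold Spec_pagination_arg_names_py
  rw [pvA_eq, pvB_eq]
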